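-- pv_equiv track=rewrite | github.com/cghayden/team-game-fall | networkTraffic/patients/hlm1_decode.py | make_pretty
-- ===== SOURCE A (Python) =====
-- def make_pretty(text):
--     # small heuristics to make the text more HL7-like / readable:
--     # - replace repeated control sequences that look like encoding markers
--     # - insert newlines on common HL7 segment IDs like MSH, PID, OBR, OBX, PV1, etc. (case-insensitive)
--     segs = ['MSH','PID','NK1','PV1','OBR','OBX','AL1','GT1','DG1','Z']  # Z* are custom segments
--     out = text
--     # insert newline before known segment markers if they're immediate content
--     for seg in segs:
--         out = out.replace(seg, '\n'+seg)
--         out = out.replace(seg.lower(), '\n'+seg.lower())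
--     # collapse multiple newlines
--     out = '\n'.join([line.strip() for line in out.splitlines() if line.strip()!=''])
--     return out
-- ===== SOURCE B (Python) =====
-- def make_pretty(text):
--     # One left-to-right pass: insert '\n' before every occurrence of a known
--     # segment marker (upper- or lower-case), then the same line cleanup.
--     tokens = ('MSH', 'PID', 'NK1', 'PV1', 'OBR', 'OBX', 'AL1', 'GT1', 'DG1', 'Z',
--               'msh', 'pid', 'nk1', 'pv1', 'obr', 'obx', 'al1', 'gt1', 'dg1', 'z')
--     parts = []
--     for i, ch in enumerate(text):
--         if text.startswith(tokens, i):
--             parts.append('\n')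
--         parts.append(ch)
--     out = ''.join(parts)
--     return '\n'.join([line.strip() for line in out.splitlines() if line.strip() != ''])
-- ===== Notes on version B (the rewrite author's own statement) =====
-- stated objective: alternative
-- what changed: A makes 20 sequential full-string replace passes (one per segment token and case) before the line cleanup; B makes ONE left-to-right scan over the text, inserting a newline wherever any of the 20 tokens starts, then the same cleanup.
import Mathlib
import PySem

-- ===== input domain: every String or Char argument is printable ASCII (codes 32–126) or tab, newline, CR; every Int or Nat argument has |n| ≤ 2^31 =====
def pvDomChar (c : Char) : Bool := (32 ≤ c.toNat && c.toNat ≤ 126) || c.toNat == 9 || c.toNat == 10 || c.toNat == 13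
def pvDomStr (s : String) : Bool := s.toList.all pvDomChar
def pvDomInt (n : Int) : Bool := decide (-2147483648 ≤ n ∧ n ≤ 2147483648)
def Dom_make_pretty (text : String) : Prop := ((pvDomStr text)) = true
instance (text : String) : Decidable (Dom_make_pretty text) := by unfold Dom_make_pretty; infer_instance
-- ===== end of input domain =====

-- B replaces A's 20 sequential full-string replace passes by ONE left-to-right scan that
-- inserts '\n' before every position where a segment token starts (same cleanup afterwards).

-- ===== PORT A =====
def make_pretty (text : String) : String :=
  let segs : List String := ["MSH", "PID", "NK1", "PV1", "OBR", "OBX", "AL1", "GT1", "DG1", "Z"]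
  let out := segs.foldl (fun out seg =>
    let out := PySem.Str.replace out seg ("\n" ++ seg)
    PySem.Str.replace out (PySem.Str.lower seg) ("\n" ++ PySem.Str.lower seg)) text
  PySem.Str.join "\n"
    (((PySem.Str.splitlines out).filter (fun line => PySem.Str.strip line != "")).map PySem.Str.strip)

-- ===== PORT B =====
-- Source B: `if text.startswith(tokens, i)` — does any token start at position i, i.e. is a
-- prefix of the suffix of `text` starting at i.
def pvAnyPrefix (toks : List (List Char)) (cs : List Char) : Bool :=
  toks.any (fun t => t.isPrefixOf cs)

-- Source B's single `for i, ch in enumerate(text)` loop, as the same scan over the suffixes.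
def pvMark (toks : List (List Char)) : List Char → List Char
  | [] => []
  | c :: rest =>
      if pvAnyPrefix toks (c :: rest) then '\n' :: c :: pvMark toks rest
      else c :: pvMark toks rest

def make_pretty_alt (text : String) : String :=
  let tokens : List String := ["MSH", "PID", "NK1", "PV1", "OBR", "OBX", "AL1", "GT1", "DG1", "Z",
                               "msh", "pid", "nk1", "pv1", "obr", "obx", "al1", "gt1", "dg1", "z"]
  let out := String.ofList (pvMark (tokens.map String.toList) text.toList)
  PySem.Str.join "\n"
    (((PySem.Str.splitlines out).filter (fun line => PySem.Str.strip line != "")).map PySem.Str.strip)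

-- ===== PRECONDITION & SPEC =====
def Spec_make_pretty (text : String) (out : String) : Prop := out = make_pretty_alt text
instance (text : String) (out : String) : Decidable (Spec_make_pretty text out) := by unfold Spec_make_pretty; infer_instance

-- ===== CLAIM (what is proved, stated in full; the proofs are below) =====
def Claim_equal_make_pretty : Prop := ∀ (text : String), Dom_make_pretty text → Spec_make_pretty text (make_pretty text)

-- ===== LEMMAS AND PROOFS =====

-- A's replace chain, at the character level.
def pvReplFold (ts : List (List Char)) (cs : List Char) : List Char :=
  ts.foldl (fun cs t => PySem.Chars.replace cs t ('\n' :: t)) cs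

-- the 20 tokens in the order A applies them
def pvTOKS : List (List Char) :=
  [['M','S','H'], ['m','s','h'], ['P','I','D'], ['p','i','d'], ['N','K','1'], ['n','k','1'],
   ['P','V','1'], ['p','v','1'], ['O','B','R'], ['o','b','r'], ['O','B','X'], ['o','b','x'],
   ['A','L','1'], ['a','l','1'], ['G','T','1'], ['g','t','1'], ['D','G','1'], ['d','g','1'],
   ['Z'], ['z']]

-- a single token is well formed: nonempty, no newline, no self-overlap at any shift
def pvTokOK (t : List Char) : Prop :=
  t ≠ [] ∧ '\n' ∉ t ∧ ∀ k, k < t.length → 0 < k → t.head? ≠ (t.drop k).head?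

-- an earlier token s never matches at the same position as t nor strictly inside t
def pvPairOK (s t : List Char) : Prop :=
  (¬ s <+: t ∧ ¬ t <+: s) ∧ ∀ k, k < t.length → 0 < k → ¬ s <+: t.drop k ∧ ¬ t.drop k <+: s

def pvGood (L : List (List Char)) : Prop :=
  (∀ t ∈ L, pvTokOK t) ∧ L.Pairwise pvPairOK

def pvTOKSB : List (List Char) :=
  [['M','S','H'], ['P','I','D'], ['N','K','1'], ['P','V','1'], ['O','B','R'], ['O','B','X'],
   ['A','L','1'], ['G','T','1'], ['D','G','1'], ['Z'],
   ['m','s','h'], ['p','i','d'], ['n','k','1'], ['p','v','1'], ['o','b','r'], ['o','b','x'],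
   ['a','l','1'], ['g','t','1'], ['d','g','1'], ['z']]

-- the scan only asks whether SOME token matches, so token order is irrelevant
theorem pvMark_perm {S S' : List (List Char)} (h : S.Perm S') :
    ∀ cs : List Char, pvMark S cs = pvMark S' cs := by
  intro cs
  induction cs with
  | nil => rfl
  | cons c rest ih =>
      simp only [pvMark, pvAnyPrefix, ih, List.Perm.any_eq h]
      rfl

theorem pvMark_nil (cs : List Char) : pvMark [] cs = cs := by
  induction cs with
  | nil => rfl
  | cons c rest ih => simp [pvMark, pvAnyPrefix, ih]

-- if one nonempty list is a prefix of another, their heads agree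
theorem pv_head_of_prefix {x y : List Char} (h : x <+: y) (hx : x ≠ []) :
    x.head? = y.head? := by
  obtain ⟨u, rfl⟩ := h
  cases x with
  | nil => exact absurd rfl hx
  | cons a x' => rfl

-- no token match of S in the first m positions ⇒ the scan copies those m characters
theorem pvMark_no_match (S : List (List Char)) (m : Nat) :
    ∀ cs : List Char, (∀ k, k < m → pvAnyPrefix S (cs.drop k) = false) →
    pvMark S cs = cs.take m ++ pvMark S (cs.drop m) := by
  induction m with
  | zero => intro cs _; simp
  | succ m ih =>
      intro cs h
      cases cs with
      | nil => simp
      | cons c rest =>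
          have h0 : pvAnyPrefix S (c :: rest) = false := h 0 (Nat.succ_pos m)
          have hrest := ih rest (fun k hk => h (k + 1) (by omega))
          simp [pvMark, h0, hrest]

-- a matched token is copied with a single '\n' in front when nothing matches inside it
theorem pvMark_match_unroll (S : List (List Char)) (t w : List Char) (h1 : t ≠ [])
    (hhead : pvAnyPrefix S (t ++ w) = true)
    (hmid : ∀ k, k < t.length → 0 < k → pvAnyPrefix S ((t ++ w).drop k) = false) :
    pvMark S (t ++ w) = '\n' :: t ++ pvMark S w := by
  cases t with
  | nil => exact absurd rfl h1
  | cons c t' =>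
      have hrest : pvMark S (t' ++ w) = t' ++ pvMark S w := by
        have := pvMark_no_match S t'.length (t' ++ w)
          (fun k hk => hmid (k + 1) (by simpa using Nat.succ_lt_succ hk) (Nat.succ_pos k))
        simpa [List.take_left, List.drop_left] using this
      have hhead' : pvAnyPrefix S (c :: (t' ++ w)) = true := by simpa using hhead
      simp [pvMark, hhead', hrest]

-- a token without self-overlap never matches strictly inside its own occurrence
theorem pv_no_self (t : List Char) (hok : pvTokOK t) :
    ∀ (w : List Char) (k : Nat), k < t.length → 0 < k →
      pvAnyPrefix [t] (t.drop k ++ w) = false := by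
  intro w k hk hk0
  simp only [pvAnyPrefix, List.any_cons, List.any_nil, Bool.or_false]
  rw [Bool.eq_false_iff]
  intro hpre
  have hpre' : t <+: t.drop k ++ w := List.isPrefixOf_iff_prefix.mp hpre
  have hd : t.drop k <+: t.drop k ++ w := List.prefix_append _ _
  have hne : t.drop k ≠ [] := by
    intro he; rw [List.drop_eq_nil_iff] at he; omega
  rcases List.prefix_or_prefix_of_prefix hpre' hd with h | h
  · exact hok.2.2 k hk hk0 (pv_head_of_prefix h hok.1)
  · exact hok.2.2 k hk hk0 (pv_head_of_prefix h hne).symm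

-- a newline-free token matches the scanned text only where it matches the original
theorem pv_prefix_scan (S : List (List Char)) :
    ∀ (ds t : List Char), '\n' ∉ t →
      t.isPrefixOf (pvMark S ds) = true → t.isPrefixOf ds = true := by
  intro ds
  induction ds with
  | nil => intro t _ h; simpa [pvMark] using h
  | cons d rest ih =>
      intro t hnl h
      cases t with
      | nil => rfl
      | cons a t' =>
          by_cases hm : pvAnyPrefix S (d :: rest) = true
          · rw [pvMark, if_pos hm] at h
            rw [List.isPrefixOf_cons₂] at h
            have : a = '\n' := by
              rcases (Bool.and_eq_true _ _).mp h with ⟨h1, _⟩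
              exact (beq_iff_eq.mp h1)
            exact absurd (this ▸ List.mem_cons_self) hnl
          · rw [pvMark, if_neg hm] at h
            rw [List.isPrefixOf_cons₂] at h ⊢
            rcases (Bool.and_eq_true _ _).mp h with ⟨h1, h2⟩
            exact (Bool.and_eq_true _ _).mpr ⟨h1, ih t' (fun hc => hnl (List.mem_cons_of_mem _ hc)) h2⟩

-- PySem replace with '\n'-prefixed replacement IS the one-token scan
theorem pv_go (t : List Char) (hok : pvTokOK t) :
    ∀ (fuel : Nat) (l acc : List Char), l.length ≤ fuel →
      PySem.Chars.replace.go t ('\n' :: t) fuel l acc = acc.reverse ++ pvMark [t] l := by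
  intro fuel
  induction fuel with
  | zero =>
      intro l acc hl
      have : l = [] := List.length_eq_zero_iff.mp (Nat.le_zero.mp hl)
      subst this
      rw [PySem.Chars.replace.go]
      simp [pvMark]
  | succ fuel ih =>
      intro l acc hl
      cases l with
      | nil =>
          rw [PySem.Chars.replace.go]
          · simp [pvMark]
          · omega
      | cons c rest =>
          rw [PySem.Chars.replace.go]
          by_cases hpre : t.isPrefixOf (c :: rest) = true
          · rw [if_pos hpre]
            obtain ⟨u, hu⟩ := List.isPrefixOf_iff_prefix.mp hpre
            have htlen : 1 ≤ t.length := by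
              cases t with
              | nil => exact absurd rfl hok.1
              | cons a t' => simp
            have hulen : u.length ≤ fuel := by
              have : t.length + u.length = (c :: rest).length := by
                rw [← hu]; simp
              simp at this hl; omega
            have hdrop : List.drop t.length (c :: rest) = u := by
              rw [← hu]; exact List.drop_left
            rw [hdrop, ih u _ hulen]
            have hun : pvMark [t] (c :: rest) = '\n' :: t ++ pvMark [t] u := by
              rw [← hu]
              exact pvMark_match_unroll [t] t u hok.1
                (by simp [pvAnyPrefix, List.isPrefixOf_iff_prefix])
                (by intro k hk hk0
                    have := pv_no_self t hok u k hk hk0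
                    rwa [List.drop_append_of_le_length (Nat.le_of_lt hk)])
            rw [hun]
            simp
          · rw [if_neg hpre]
            have hrest : rest.length ≤ fuel := by simp at hl; omega
            rw [ih rest _ hrest]
            have hany : pvAnyPrefix [t] (c :: rest) = false := by
              simp only [pvAnyPrefix, List.any_cons, List.any_nil, Bool.or_false]
              exact Bool.eq_false_iff.mpr hpre
            rw [pvMark, if_neg (by simp [hany])]
            simp

theorem pv_replace_eq (t : List Char) (hok : pvTokOK t) (cs : List Char) :
    PySem.Chars.replace cs t ('\n' :: t) = pvMark [t] cs := by
  have hne : t.isEmpty = false := by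
    cases t with
    | nil => exact absurd rfl hok.1
    | cons a t' => rfl
  rw [PySem.Chars.replace, if_neg (by simp [hne])]
  simpa using pv_go t hok cs.length cs [] le_rfl

-- composing one more scan on the scanned text = scanning with the extended token list
theorem pv_step (S : List (List Char)) (t : List Char) (hok : pvTokOK t)
    (hpair : ∀ s ∈ S, pvPairOK s t) :
    ∀ cs : List Char, pvMark [t] (pvMark S cs) = pvMark (S ++ [t]) cs := by
  suffices h : ∀ (n : Nat) (cs : List Char), cs.length ≤ n →
      pvMark [t] (pvMark S cs) = pvMark (S ++ [t]) cs by
    exact fun cs => h cs.length cs le_rfl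
  intro n
  induction n with
  | zero =>
      intro cs hl
      have : cs = [] := List.length_eq_zero_iff.mp (Nat.le_zero.mp hl)
      subst this
      simp [pvMark]
  | succ n ih =>
      intro cs hl
      cases cs with
      | nil => simp [pvMark]
      | cons c rest =>
          have htne : t ≠ [] := hok.1
          have happ : pvAnyPrefix (S ++ [t]) (c :: rest) =
              (pvAnyPrefix S (c :: rest) || pvAnyPrefix [t] (c :: rest)) := by
            simp [pvAnyPrefix]
          -- t never matches '\n'-headed text
          have hnlmatch : ∀ X : List Char, pvAnyPrefix [t] ('\n' :: X) = false := by
            intro X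
            simp only [pvAnyPrefix, List.any_cons, List.any_nil, Bool.or_false]
            rw [Bool.eq_false_iff]
            intro hpre
            cases t with
            | nil => exact htne rfl
            | cons a t' =>
                rw [List.isPrefixOf_cons₂] at hpre
                have : a = '\n' := beq_iff_eq.mp ((Bool.and_eq_true _ _).mp hpre).1
                exact hok.2.1 (this ▸ List.mem_cons_self)
          -- t matches c :: (scan of rest) only if it matches c :: rest
          have hcarry : pvAnyPrefix [t] (c :: rest) = false →
              pvAnyPrefix [t] (c :: pvMark S rest) = false := by
            intro hf
            simp only [pvAnyPrefix, List.any_cons, List.any_nil, Bool.or_false] at hf ⊢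
            rw [Bool.eq_false_iff] at hf ⊢
            intro hpre
            apply hf
            cases t with
            | nil => simp
            | cons a t' =>
                rw [List.isPrefixOf_cons₂] at hpre ⊢
                rcases (Bool.and_eq_true _ _).mp hpre with ⟨h1, h2⟩
                exact (Bool.and_eq_true _ _).mpr ⟨h1,
                  pv_prefix_scan S rest t'
                    (fun hc => hok.2.1 (List.mem_cons_of_mem _ hc)) h2⟩
          by_cases hS : pvAnyPrefix S (c :: rest) = true
          · -- an earlier token matches here; t cannot
            obtain ⟨s, hsS, hsp⟩ := by
              simpa only [pvAnyPrefix, List.any_eq_true] using hS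
            have hsp' : s <+: c :: rest := List.isPrefixOf_iff_prefix.mp hsp
            have ht : pvAnyPrefix [t] (c :: rest) = false := by
              simp only [pvAnyPrefix, List.any_cons, List.any_nil, Bool.or_false]
              rw [Bool.eq_false_iff]
              intro hpre
              have hpre' : t <+: c :: rest := List.isPrefixOf_iff_prefix.mp hpre
              rcases List.prefix_or_prefix_of_prefix hsp' hpre' with h | h
              · exact (hpair s hsS).1.1 h
              · exact (hpair s hsS).1.2 h
            rw [pvMark, if_pos hS, pvMark, if_neg (by simp [hnlmatch]),
              pvMark, if_neg (by simp [hcarry ht]),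
              ih rest (by simpa using Nat.le_of_succ_le_succ hl),
              pvMark, if_pos (by rw [happ, hS]; rfl)]
          · by_cases ht : pvAnyPrefix [t] (c :: rest) = true
            · -- t matches here and nothing matches strictly inside it
              have htp : t <+: c :: rest := by
                simp only [pvAnyPrefix, List.any_cons, List.any_nil,
                  Bool.or_false] at ht
                exact List.isPrefixOf_iff_prefix.mp ht
              obtain ⟨w, hw⟩ := htp
              have htlen : 1 ≤ t.length := by
                cases t with
                | nil => exact absurd rfl htne
                | cons a t' => simp
              have hmidS : ∀ k, k < t.length → 0 < k →
                  pvAnyPrefix S ((t ++ w).drop k) = false := by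
                intro k hk hk0
                rw [List.drop_append_of_le_length (Nat.le_of_lt hk)]
                simp only [pvAnyPrefix]
                rw [Bool.eq_false_iff]
                simp only [ne_eq, List.any_eq_true, not_exists, not_and]
                intro s hsS hsp
                have hsp' : s <+: t.drop k ++ w := List.isPrefixOf_iff_prefix.mp hsp
                have hd : t.drop k <+: t.drop k ++ w := List.prefix_append _ _
                rcases List.prefix_or_prefix_of_prefix hsp' hd with h | h
                · exact ((hpair s hsS).2 k hk hk0).1 h
                · exact ((hpair s hsS).2 k hk hk0).2 h
              have hmidT : ∀ k, k < t.length → 0 < k →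
                  pvAnyPrefix [t] ((t ++ w).drop k) = false := by
                intro k hk hk0
                rw [List.drop_append_of_le_length (Nat.le_of_lt hk)]
                exact pv_no_self t hok w k hk hk0
              have hmidST : ∀ k, k < t.length → 0 < k →
                  pvAnyPrefix (S ++ [t]) ((t ++ w).drop k) = false := by
                intro k hk hk0
                have h1 := hmidS k hk hk0
                have h2 := hmidT k hk hk0
                simp only [pvAnyPrefix, List.any_append] at h1 h2 ⊢
                rw [h1, h2]
                rfl
              have hS0 : pvAnyPrefix S (t ++ w) = false := by
                rw [hw]; exact Bool.eq_false_iff.mpr hS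
              have hS' : ∀ k, k < t.length → pvAnyPrefix S ((t ++ w).drop k) = false := by
                intro k hk
                cases Nat.eq_zero_or_pos k with
                | inl h => subst h; simpa using hS0
                | inr h => exact hmidS k hk h
              -- the S-scan copies t verbatim
              have hscanS : pvMark S (t ++ w) = t ++ pvMark S w := by
                have := pvMark_no_match S t.length (t ++ w) hS'
                simpa [List.take_left, List.drop_left] using this
              have hwlen : w.length ≤ n := by
                have : t.length + w.length = (c :: rest).length := by
                  rw [← List.length_append, hw]
                simp at this hl; omega
              rw [← hw]
              rw [hscanS,
                pvMark_match_unroll [t] t (pvMark S w) htne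
                  (by simp [pvAnyPrefix, List.isPrefixOf_iff_prefix])
                  (by intro k hk hk0
                      rw [List.drop_append_of_le_length (Nat.le_of_lt hk)]
                      exact pv_no_self t hok _ k hk hk0),
                ih w hwlen,
                pvMark_match_unroll (S ++ [t]) t w htne
                  (by simp only [pvAnyPrefix, List.any_append]
                      have : pvAnyPrefix [t] (t ++ w) = true := by
                        simp [pvAnyPrefix, List.isPrefixOf_iff_prefix]
                      simp only [pvAnyPrefix] at this
                      rw [this, Bool.or_true])
                  hmidST]
            · -- nothing matches here
              have hSf : pvAnyPrefix S (c :: rest) = false := Bool.eq_false_iff.mpr hS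
              have htf : pvAnyPrefix [t] (c :: rest) = false := Bool.eq_false_iff.mpr ht
              rw [pvMark, if_neg (by rw [hSf]; exact Bool.false_ne_true),
                pvMark, if_neg (by rw [hcarry htf]; exact Bool.false_ne_true),
                ih rest (by simpa using Nat.le_of_succ_le_succ hl),
                pvMark, if_neg (by rw [happ, hSf, htf]; exact Bool.false_ne_true)]

-- A's whole replace chain = B's single scan
theorem pv_chain (L : List (List Char)) (hG : pvGood L) (cs : List Char) :
    pvReplFold L cs = pvMark L cs := by
  induction L using List.reverseRecOn generalizing cs with
  | nil => simp [pvReplFold, pvMark_nil]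
  | append_singleton M t ih =>
      have hGM : pvGood M := by
        refine ⟨fun s hs => hG.1 s (List.mem_append_left _ hs), ?_⟩
        exact ((List.pairwise_append.mp hG.2).1)
      have hok : pvTokOK t := hG.1 t (List.mem_append_right _ List.mem_cons_self)
      have hpair : ∀ s ∈ M, pvPairOK s t := fun s hs =>
        (List.pairwise_append.mp hG.2).2.2 s hs t List.mem_cons_self
      rw [pvReplFold, List.foldl_append]
      show PySem.Chars.replace (pvReplFold M cs) t ('\n' :: t) = _
      rw [pv_replace_eq t hok, ih hGM, pv_step M t hok hpair]

theorem pv_lift (segs : List String) (s : String) :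
    (segs.foldl (fun out seg =>
      PySem.Str.replace (PySem.Str.replace out seg ("\n" ++ seg))
        (PySem.Str.lower seg) ("\n" ++ PySem.Str.lower seg)) s) =
    String.ofList (pvReplFold
      (segs.flatMap (fun seg => [seg.toList, (PySem.Str.lower seg).toList])) s.toList) := by
  induction segs generalizing s with
  | nil => simp [pvReplFold]
  | cons seg rest ih =>
      rw [List.foldl_cons, ih]
      simp [pvReplFold, PySem.Str.replace, String.toList_ofList, String.toList_append]

theorem pv_core (text : String) :
    (["MSH", "PID", "NK1", "PV1", "OBR", "OBX", "AL1", "GT1", "DG1", "Z"].foldl (fun out seg =>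
      PySem.Str.replace (PySem.Str.replace out seg ("\n" ++ seg))
        (PySem.Str.lower seg) ("\n" ++ PySem.Str.lower seg)) text) =
    String.ofList (pvMark pvTOKS text.toList) := by
  rw [pv_lift]
  have hflat : (["MSH", "PID", "NK1", "PV1", "OBR", "OBX", "AL1", "GT1", "DG1", "Z"] :
      List String).flatMap (fun seg => [seg.toList, (PySem.Str.lower seg).toList]) = pvTOKS := by
    decide
  rw [hflat, pv_chain pvTOKS (by unfold pvGood pvTokOK pvPairOK pvTOKS; decide) text.toList]

-- ===== VERDICT (by name: the statement is the Claim_ definition above) =====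
theorem make_pretty_spec : Claim_equal_make_pretty := by
  intro text _
  unfold Spec_make_pretty make_pretty make_pretty_alt
  dsimp only
  rw [pv_core text]
  have htoks : (["MSH", "PID", "NK1", "PV1", "OBR", "OBX", "AL1", "GT1", "DG1", "Z",
                 "msh", "pid", "nk1", "pv1", "obr", "obx", "al1", "gt1", "dg1", "z"] :
        List String).map String.toList = pvTOKSB := by decide
  rw [htoks, pvMark_perm (show pvTOKSB.Perm pvTOKS by decide) text.toList]
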